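-- pv_equiv track=rewrite | github.com/0x00vb/astra | backend/app/core/query.py | extract_top_sentences
-- ===== SOURCE A (Python) =====
-- def extract_top_sentences(text: str, max_chars: int) -> str:
--     """
--     Extract top sentences from text to fit within max_chars.
--
--     Uses simple sentence splitting and prioritizes earlier sentences.
--     This is a fallback when chunk truncation is needed.
--
--     Args:
--         text: Text to summarize
--         max_chars: Maximum characters to return
--
--     Returns:
--         Truncated text with complete sentences
--     """
--     if len(text) <= max_chars:
--         return text
--
--     # Simple sentence splitting (basic approach)
--     sentences = []
--     current_sentence = ""
--
--     for char in text:
--         current_sentence += char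
--         if char in '.!?':
--             sentences.append(current_sentence.strip())
--             current_sentence = ""
--
--     if current_sentence.strip():
--         sentences.append(current_sentence.strip())
--
--     # Take sentences until we exceed max_chars
--     result = ""
--     for sentence in sentences:
--         if len(result) + len(sentence) + 1 <= max_chars:
--             result += sentence + " "
--         else:
--             break
--
--     return result.strip() if result else text[:max_chars]
-- ===== SOURCE B (Python) =====
-- def extract_top_sentences(text: str, max_chars: int) -> str:
--     """Same result as A, but the greedy accumulate-and-break loop is replaced
--     by a prefix-sum table over sentence costs plus a binary search for the cutoff."""
--     if len(text) <= max_chars: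
--         return text
--
--     # sentence splitting (as in A)
--     sentences = []
--     current_sentence = ""
--     for char in text:
--         current_sentence += char
--         if char in '.!?':
--             sentences.append(current_sentence.strip())
--             current_sentence = ""
--     if current_sentence.strip():
--         sentences.append(current_sentence.strip())
--
--     # prefix-sum table: cum[i] = total length of the first i+1 sentences,
--     # each costing len(s) + 1 (the joining/trailing space)
--     cum = []
--     total = 0
--     for s in sentences:
--         total += len(s) + 1
--         cum.append(total)
--
--     # binary search for the rightmost k with cum[k-1] <= max_chars (cum is increasing)
--     lo, hi = 0, len(cum)
--     while lo < hi:
--         mid = (lo + hi) // 2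
--         if cum[mid] <= max_chars:
--             lo = mid + 1
--         else:
--             hi = mid
--
--     return ' '.join(sentences[:lo]) if lo else text[:max_chars]
-- ===== Notes on version B (the rewrite author's own statement) =====
-- stated objective: alternative
-- what changed: The greedy accumulate-and-break loop over sentences is replaced by a prefix-sum cost table plus a binary search for the cutoff index, with the result assembled by ' '.join of the chosen prefix instead of string accumulation and a final strip.
import Mathlib
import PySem

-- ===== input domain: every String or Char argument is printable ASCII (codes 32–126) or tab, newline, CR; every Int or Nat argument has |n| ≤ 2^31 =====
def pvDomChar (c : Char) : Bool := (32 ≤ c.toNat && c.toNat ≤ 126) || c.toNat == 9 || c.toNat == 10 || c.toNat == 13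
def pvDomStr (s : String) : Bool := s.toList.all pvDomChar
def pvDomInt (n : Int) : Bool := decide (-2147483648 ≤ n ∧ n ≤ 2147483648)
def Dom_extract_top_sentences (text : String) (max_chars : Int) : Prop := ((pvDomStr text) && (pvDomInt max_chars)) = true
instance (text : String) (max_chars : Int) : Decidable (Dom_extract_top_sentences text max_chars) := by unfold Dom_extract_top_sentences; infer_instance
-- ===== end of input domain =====

-- B replaces A's greedy accumulate-and-break loop by a prefix-sum cost table plus a
-- binary search for the cutoff, joining the chosen sentence prefix; same cost class.

-- ===== PORT A =====
-- loop body of A's sentence-splitting 'for char in text' (state: (sentences, current_sentence));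
-- 'char in ".!?"' is single-char membership, written as the three equalities
def pvStepA (p : List (List Char) × List Char) (c : Char) : List (List Char) × List Char :=
  let cur := p.2 ++ [c]
  if c = '.' || c = '!' || c = '?' then (p.1 ++ [PySem.Chars.strip cur], []) else (p.1, cur)

-- A's greedy 'for sentence in sentences: … else: break' loop (len(result) = (res.length : Int))
def pvGreedyA (max_chars : Int) : List (List Char) → List Char → List Char
  | [], res => res
  | s :: rest, res =>
    if (res.length : Int) + (s.length : Int) + 1 ≤ max_chars then
      pvGreedyA max_chars rest (res ++ s ++ [' '])
    else res

def extract_top_sentences (text : String) (max_chars : Int) : String :=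
  if PySem.Str.len text ≤ max_chars then text
  else
    let cs := text.toList
    let st := cs.foldl pvStepA ([], [])
    let sents := if PySem.Chars.strip st.2 ≠ [] then st.1 ++ [PySem.Chars.strip st.2] else st.1
    let res := pvGreedyA max_chars sents []
    if res ≠ [] then String.ofList (PySem.Chars.strip res)
    else String.ofList (PySem.List.slice cs none (some max_chars))

-- ===== PORT B =====
-- loop body of B's sentence-splitting 'for char in text' (same splitting as A, per Source B)
def pvStepB (p : List (List Char) × List Char) (c : Char) : List (List Char) × List Char :=
  let cur := p.2 ++ [c]
  if c = '.' || c = '!' || c = '?' then (p.1 ++ [PySem.Chars.strip cur], []) else (p.1, cur)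

-- B's prefix-sum loop body (state: (total, cum))
def pvCumB (p : Int × List Int) (s : List Char) : Int × List Int :=
  let t := p.1 + (s.length : Int) + 1
  (t, p.2 ++ [t])

-- B's hand-written binary-search 'while lo < hi' loop; cum[mid] is in range throughout
-- (lo ≤ mid < hi ≤ len(cum)), so the getD default is never consulted
def pvBisectB (cum : List Int) (mx : Int) (lo hi : Nat) : Nat :=
  if h : lo < hi then
    let mid := (lo + hi) / 2
    if cum.getD mid 0 ≤ mx then pvBisectB cum mx (mid + 1) hi
    else pvBisectB cum mx lo mid
  else lo
termination_by hi - lo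
decreasing_by all_goals omega

def extract_top_sentences_alt (text : String) (max_chars : Int) : String :=
  if PySem.Str.len text ≤ max_chars then text
  else
    let cs := text.toList
    let st := cs.foldl pvStepB ([], [])
    let sents := if PySem.Chars.strip st.2 ≠ [] then st.1 ++ [PySem.Chars.strip st.2] else st.1
    let cum := (sents.foldl pvCumB (0, [])).2
    let k := pvBisectB cum max_chars 0 cum.length
    if k ≠ 0 then String.ofList (PySem.Chars.join [' '] (PySem.List.slice sents none (some (k : Int))))
    else String.ofList (PySem.List.slice cs none (some max_chars))

-- ===== PRECONDITION & SPEC =====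
def Spec_extract_top_sentences (text : String) (max_chars : Int) (out : String) : Prop := out = extract_top_sentences_alt text max_chars
instance (text : String) (max_chars : Int) (out : String) : Decidable (Spec_extract_top_sentences text max_chars out) := by unfold Spec_extract_top_sentences; infer_instance

-- ===== CLAIM (what is proved, stated in full; the proofs are below) =====
def Claim_equal_extract_top_sentences : Prop := ∀ (text : String) (max_chars : Int), Dom_extract_top_sentences text max_chars → Spec_extract_top_sentences text max_chars (extract_top_sentences text max_chars)

-- ===== LEMMAS AND PROOFS =====

-- the list of sentences A's greedy loop takes, tracking the accumulated length
def pvGTake (mx : Int) : List (List Char) → Int → List (List Char)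
  | [], _ => []
  | s :: rest, a =>
    if a + (s.length : Int) + 1 ≤ mx then s :: pvGTake mx rest (a + (s.length : Int) + 1)
    else []

-- prefix sums of len(s)+1 starting from a
def pvCumL : List (List Char) → Int → List Int
  | [], _ => []
  | s :: rest, a => (a + (s.length : Int) + 1) :: pvCumL rest (a + (s.length : Int) + 1)

lemma pvGreedyA_eq (mx : Int) : ∀ (l : List (List Char)) (res : List Char),
    pvGreedyA mx l res = res ++ ((pvGTake mx l (res.length : Int)).map (· ++ [' '])).flatten := by
  intro l
  induction l with
  | nil => intro res; simp [pvGreedyA, pvGTake]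
  | cons s rest ih =>
    intro res
    simp only [pvGreedyA, pvGTake]
    split
    · rw [ih]
      simp only [List.map_cons, List.flatten_cons, List.append_assoc, List.length_append,
        List.length_singleton]
      push_cast
      ring_nf
    · simp


lemma pvCum_eq : ∀ (l : List (List Char)) (a : Int) (acc : List Int),
    (l.foldl pvCumB (a, acc)).2 = acc ++ pvCumL l a := by
  intro l
  induction l with
  | nil => intro a acc; simp [pvCumL]
  | cons s rest ih =>
    intro a acc
    simp only [List.foldl_cons, pvCumB, pvCumL]
    rw [ih]
    simp


lemma pvCumL_length : ∀ (l : List (List Char)) (a : Int), (pvCumL l a).length = l.length := by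
  intro l
  induction l with
  | nil => intro a; simp [pvCumL]
  | cons s rest ih => intro a; simp [pvCumL, ih]


lemma pvCumL_le : ∀ (l : List (List Char)) (a : Int), ∀ x ∈ pvCumL l a, a ≤ x := by
  intro l
  induction l with
  | nil => simp [pvCumL]
  | cons s rest ih =>
    intro a x hx
    simp only [pvCumL, List.mem_cons] at hx
    rcases hx with rfl | hx
    · have : (0:Int) ≤ (s.length : Int) := Int.natCast_nonneg _
      omega
    · have := ih _ _ hx; omega


lemma pvCumL_pairwise : ∀ (l : List (List Char)) (a : Int), (pvCumL l a).Pairwise (· ≤ ·) := by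
  intro l
  induction l with
  | nil => simp [pvCumL]
  | cons s rest ih =>
    intro a
    simp only [pvCumL, List.pairwise_cons]
    exact ⟨fun x hx => pvCumL_le _ _ x hx, ih _⟩


lemma pvGTake_eq_take (mx : Int) : ∀ (l : List (List Char)) (a : Int),
    pvGTake mx l a = l.take ((pvCumL l a).takeWhile (fun x => decide (x ≤ mx))).length := by
  intro l
  induction l with
  | nil => intro a; simp [pvGTake, pvCumL]
  | cons s rest ih =>
    intro a
    simp only [pvGTake, pvCumL, List.takeWhile_cons]
    split
    · next h => simp [h, ih]
    · next h => simp [h]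


lemma pvTwLen (p : Int → Bool) : ∀ (l : List Int) (k : ℕ), k ≤ l.length →
    (∀ i, i < k → p (l.getD i 0) = true) → (∀ _ : k < l.length, p (l.getD k 0) = false) →
    (l.takeWhile p).length = k := by
  intro l
  induction l with
  | nil => intro k hk _ _; simp at hk ⊢; omega
  | cons c t ih =>
    intro k hk h1 h2
    cases k with
    | zero =>
      have hc : p c = false := h2 (by simp)
      simp [hc]
    | succ k =>
      have hc : p c = true := by simpa using h1 0 (Nat.succ_pos k)
      simp only [List.takeWhile_cons, hc, if_true, List.length_cons]
      have := ih k (by simpa using hk)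
        (fun i hi => by simpa using h1 (i+1) (by omega))
        (fun h => by simpa using h2 (by simpa using h))
      omega


lemma pvBisect_aux (cum : List Int) (mx : Int) : ∀ (n lo hi : ℕ), hi - lo ≤ n → lo ≤ hi → hi ≤ cum.length →
    (∀ i j, i ≤ j → j < cum.length → cum.getD i 0 ≤ cum.getD j 0) →
    (∀ i, i < lo → cum.getD i 0 ≤ mx) →
    (∀ i, hi ≤ i → i < cum.length → ¬ cum.getD i 0 ≤ mx) →
    pvBisectB cum mx lo hi = (cum.takeWhile (fun x => decide (x ≤ mx))).length := by
  intro n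
  induction n with
  | zero =>
    intro lo hi h1 hlohi hhi hmono hlo hhi2
    have heq : lo = hi := by omega
    rw [pvBisectB, dif_neg (by omega : ¬ lo < hi)]
    exact (pvTwLen (fun x => decide (x ≤ mx)) cum lo (by omega)
      (fun i hi' => by simpa using hlo i hi')
      (fun h => by simpa using hhi2 lo (by omega) h)).symm
  | succ n ih =>
    intro lo hi h1 hlohi hhi hmono hlo hhi2
    rw [pvBisectB]
    split
    · next hlt =>
      dsimp only
      have hm1 : lo ≤ (lo + hi) / 2 := by omega
      have hm2 : (lo + hi) / 2 < hi := by omega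
      set mid := (lo + hi) / 2 with hmid
      split
      · next hle =>
        exact ih (mid+1) hi (by omega) (by omega) hhi hmono
          (fun i hi' => (hmono i mid (by omega) (by omega)).trans hle) hhi2
      · next hgt =>
        exact ih lo mid (by omega) (by omega) (by omega) hmono hlo
          (fun i hi' hilen h => hgt ((hmono mid i hi' hilen).trans h))
    · next hge =>
      exact (pvTwLen (fun x => decide (x ≤ mx)) cum lo (by omega)
        (fun i hi' => by simpa using hlo i hi')
        (fun h => by simpa using hhi2 lo (by omega) h)).symm

lemma pvBisect_spec (cum : List Int) (mx : Int) (lo hi : ℕ) (hlohi : lo ≤ hi) (hhi : hi ≤ cum.length)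
    (hmono : ∀ i j, i ≤ j → j < cum.length → cum.getD i 0 ≤ cum.getD j 0)
    (hlo : ∀ i, i < lo → cum.getD i 0 ≤ mx)
    (hhi2 : ∀ i, hi ≤ i → i < cum.length → ¬ cum.getD i 0 ≤ mx) :
    pvBisectB cum mx lo hi = (cum.takeWhile (fun x => decide (x ≤ mx))).length :=
  pvBisect_aux cum mx (hi - lo) lo hi le_rfl hlohi hhi hmono hlo hhi2

-- ---- strip facts ----

lemma pvDropWhile_head {p : Char → Bool} : ∀ {l : List Char} {c : Char} {t : List Char},
    l.dropWhile p = c :: t → p c = false := by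
  intro l
  induction l with
  | nil => intro c t h; simp at h
  | cons x xs ih =>
    intro c t h
    rw [List.dropWhile_cons] at h
    split at h
    · exact ih h
    · next hx => cases h; simpa using hx


lemma pvDropWhile_cons_of_false {p : Char → Bool} {c : Char} (t : List Char) (h : p c = false) :
    (c :: t).dropWhile p = c :: t := by
  simp [h]


lemma pvStrip_nil_all (z : List Char) (h : PySem.Chars.strip z = []) :
    ∀ d ∈ z, PySem.Chars.isspace d = true := by
  intro d hd
  unfold PySem.Chars.strip PySem.Chars.rstrip PySem.Chars.lstrip at h
  have h1 : (PySem.Chars.isspace ∘ id) = PySem.Chars.isspace := rfl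
  have h2 : List.dropWhile PySem.Chars.isspace (List.dropWhile PySem.Chars.isspace z).reverse = [] := by
    simpa using congrArg List.reverse h
  rw [List.dropWhile_eq_nil_iff] at h2
  have h3 : ∀ x ∈ List.dropWhile PySem.Chars.isspace z, PySem.Chars.isspace x = true := by
    intro x hx; exact h2 x (by simpa using hx)
  have h4 := List.takeWhile_append_dropWhile (p := PySem.Chars.isspace) (l := z)
  rw [← h4] at hd
  rcases List.mem_append.mp hd with h5 | h5
  · exact List.mem_takeWhile_imp h5
  · exact h3 d h5


lemma pvStrip_append_ne_nil (x : List Char) (c : Char) (h : PySem.Chars.isspace c = false) :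
    PySem.Chars.strip (x ++ [c]) ≠ [] := by
  intro hstrip
  have := pvStrip_nil_all _ hstrip c (by simp)
  rw [h] at this
  exact Bool.false_ne_true this


lemma pvDW_idem (p : Char → Bool) (l : List Char) :
    List.dropWhile p (List.dropWhile p l) = List.dropWhile p l := by
  rcases hd : List.dropWhile p l with _ | ⟨c, t⟩
  · rfl
  · exact pvDropWhile_cons_of_false t (pvDropWhile_head hd)

lemma pvRstrip_idem (z : List Char) :
    PySem.Chars.rstrip (PySem.Chars.rstrip z) = PySem.Chars.rstrip z := by
  unfold PySem.Chars.rstrip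
  rw [List.reverse_reverse, pvDW_idem]

lemma pvRstrip_prefix (y : List Char) : PySem.Chars.rstrip y <+: y := by
  unfold PySem.Chars.rstrip
  have h := List.dropWhile_suffix (l := y.reverse) PySem.Chars.isspace
  have := List.reverse_prefix.mpr h
  simpa using this

lemma pvStrip_idem (x : List Char) : PySem.Chars.strip (PySem.Chars.strip x) = PySem.Chars.strip x := by
  have key : PySem.Chars.lstrip (PySem.Chars.rstrip (PySem.Chars.lstrip x))
      = PySem.Chars.rstrip (PySem.Chars.lstrip x) := by
    rcases hy : PySem.Chars.lstrip x with _ | ⟨c, t⟩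
    · simp [PySem.Chars.rstrip, PySem.Chars.lstrip]
    · have hc : PySem.Chars.isspace c = false := pvDropWhile_head hy
      rcases hr : PySem.Chars.rstrip (c :: t) with _ | ⟨d, u⟩
      · simp [PySem.Chars.lstrip]
      · have hpre : (d :: u) <+: (c :: t) := by rw [← hr]; exact pvRstrip_prefix _
        obtain ⟨w, hw⟩ := hpre
        have hdc : d = c := by cases hw; rfl
        subst hdc
        exact pvDropWhile_cons_of_false u hc
  unfold PySem.Chars.strip
  rw [key, pvRstrip_idem]

-- a nonempty stripped list is fixed by lstrip and rstrip, and its head is not a space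
lemma pvStripped_facts (s : List Char) (hne : s ≠ []) (hs : PySem.Chars.strip s = s) :
    PySem.Chars.lstrip s = s ∧ PySem.Chars.rstrip s = s ∧
    (∀ c t, s = c :: t → PySem.Chars.isspace c = false) := by
  have hsuf : PySem.Chars.lstrip s <:+ s := List.dropWhile_suffix _
  have hlen1 : (PySem.Chars.lstrip s).length ≤ s.length := List.length_dropWhile_le _ _
  have hlen2 : (PySem.Chars.strip s).length ≤ (PySem.Chars.lstrip s).length := by
    unfold PySem.Chars.strip PySem.Chars.rstrip
    simpa using List.length_dropWhile_le PySem.Chars.isspace (PySem.Chars.lstrip s).reverse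
  have hslen : (PySem.Chars.strip s).length = s.length := by rw [hs]
  have hl : PySem.Chars.lstrip s = s := hsuf.eq_of_length (by omega)
  have hr : PySem.Chars.rstrip s = s := by
    have : PySem.Chars.rstrip (PySem.Chars.lstrip s) = s := hs
    rwa [hl] at this
  refine ⟨hl, hr, ?_⟩
  intro c t hct
  subst hct
  by_cases hc : PySem.Chars.isspace c = true
  · exfalso
    unfold PySem.Chars.lstrip at hl
    rw [List.dropWhile_cons, if_pos hc] at hl
    have := List.length_dropWhile_le PySem.Chars.isspace t
    have := congrArg List.length hl
    simp at this
    omega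
  · simpa using hc


lemma pvRstrip_append (x y : List Char) (h : PySem.Chars.rstrip y ≠ []) :
    PySem.Chars.rstrip (x ++ y) = x ++ PySem.Chars.rstrip y := by
  unfold PySem.Chars.rstrip at *
  rw [List.reverse_append, List.dropWhile_append]
  have hne : (List.dropWhile PySem.Chars.isspace y.reverse).isEmpty = false := by
    rcases hd : List.dropWhile PySem.Chars.isspace y.reverse with _ | ⟨a, b⟩
    · exfalso; apply h; rw [hd]; rfl
    · rfl
  rw [hne]
  simp


lemma pvJoin_ne_nil : ∀ (l : List (List Char)), l ≠ [] → (∀ s ∈ l, s ≠ []) →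
    PySem.Chars.join [' '] l ≠ [] := by
  intro l hne hels
  rcases l with _ | ⟨s, t⟩
  · simp at hne
  rcases t with _ | ⟨q, r⟩
  · rw [PySem.Chars.join_singleton]; exact hels s (by simp)
  · rw [PySem.Chars.join_cons_cons]
    intro h
    have := hels s (by simp)
    simp [List.append_eq_nil_iff] at h


lemma pvRstrip_flatten : ∀ (l : List (List Char)), l ≠ [] →
    (∀ s ∈ l, s ≠ [] ∧ PySem.Chars.strip s = s) →
    PySem.Chars.rstrip ((l.map (· ++ [' '])).flatten) = PySem.Chars.join [' '] l := by
  intro l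
  induction l with
  | nil => intro h; simp at h
  | cons s t ih =>
    intro _ hl
    obtain ⟨hsne, hss⟩ := hl s (by simp)
    obtain ⟨-, hrs, -⟩ := pvStripped_facts s hsne hss
    rcases t with _ | ⟨q, r⟩
    · simp only [List.map_cons, List.map_nil, List.flatten_cons, List.flatten_nil,
        List.append_nil, PySem.Chars.join_singleton]
      unfold PySem.Chars.rstrip at *
      rw [List.reverse_append]
      simp only [List.reverse_cons, List.reverse_nil, List.nil_append, List.singleton_append]
      rw [List.dropWhile_cons, if_pos (by decide : PySem.Chars.isspace ' ' = true)]
      exact hrs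
    · have hrec := ih (by simp) (fun x hx => hl x (by simp [hx]))
      have hjne : PySem.Chars.join [' '] (q :: r) ≠ [] :=
        pvJoin_ne_nil _ (by simp) (fun x hx => (hl x (by simp [hx])).1)
      have hFne : PySem.Chars.rstrip (((q :: r).map (· ++ [' '])).flatten) ≠ [] := by
        rw [hrec]; exact hjne
      simp only [List.map_cons, List.flatten_cons] at *
      rw [pvRstrip_append _ _ hFne, hrec, PySem.Chars.join_cons_cons]


lemma pvStrip_flatten (l : List (List Char)) (hne : l ≠ [])
    (hl : ∀ s ∈ l, s ≠ [] ∧ PySem.Chars.strip s = s) :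
    PySem.Chars.strip ((l.map (· ++ [' '])).flatten) = PySem.Chars.join [' '] l := by
  rcases l with _ | ⟨s, t⟩
  · simp at hne
  obtain ⟨hsne, hss⟩ := hl s (by simp)
  obtain ⟨-, -, hhead⟩ := pvStripped_facts s hsne hss
  obtain ⟨c, cs, rfl⟩ : ∃ c cs, s = c :: cs := by
    rcases s with _ | ⟨c, cs⟩
    · exact absurd rfl hsne
    · exact ⟨c, cs, rfl⟩
  have hc : PySem.Chars.isspace c = false := hhead c cs rfl
  unfold PySem.Chars.strip
  have hshape : (((c :: cs) :: t).map (· ++ [' '])).flatten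
      = c :: (cs ++ [' '] ++ ((t.map (· ++ [' '])).flatten)) := by simp
  have hlF : PySem.Chars.lstrip ((((c :: cs) :: t).map (· ++ [' '])).flatten)
      = (((c :: cs) :: t).map (· ++ [' '])).flatten := by
    rw [hshape]
    exact pvDropWhile_cons_of_false _ hc
  rw [hlF]
  exact pvRstrip_flatten _ (by simp) hl



-- every sentence the splitting loop produces is nonempty and stripped
lemma pvSplit_inv : ∀ (cs : List Char) (p : List (List Char) × List Char),
    (∀ s ∈ p.1, s ≠ [] ∧ PySem.Chars.strip s = s) →
    (∀ s ∈ (cs.foldl pvStepA p).1, s ≠ [] ∧ PySem.Chars.strip s = s) := by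
  intro cs
  induction cs with
  | nil => intro p hp; simpa using hp
  | cons c cs ih =>
    intro p hp
    simp only [List.foldl_cons]
    apply ih
    unfold pvStepA
    split
    · next hc =>
      intro s hs
      rcases List.mem_append.mp hs with h | h
      · exact hp s h
      · have hs' : s = PySem.Chars.strip (p.2 ++ [c]) := by simpa using h
        subst hs'
        have hcs : PySem.Chars.isspace c = false := by
          rcases Bool.or_eq_true_iff.mp hc with h' | h'
          · rcases Bool.or_eq_true_iff.mp h' with h'' | h''
            · rw [show c = '.' from by simpa using h'']; decide
            · rw [show c = '!' from by simpa using h'']; decide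
          · rw [show c = '?' from by simpa using h']; decide
        exact ⟨pvStrip_append_ne_nil _ _ hcs, pvStrip_idem _⟩
    · exact hp


lemma pvMain (mx : Int) (cs : List Char) (sents : List (List Char))
    (hs : ∀ s ∈ sents, s ≠ [] ∧ PySem.Chars.strip s = s) :
    (if pvGreedyA mx sents [] ≠ [] then String.ofList (PySem.Chars.strip (pvGreedyA mx sents []))
     else String.ofList (PySem.List.slice cs none (some mx)))
    = (if pvBisectB (sents.foldl pvCumB (0, [])).2 mx 0 ((sents.foldl pvCumB (0, [])).2).length ≠ 0 then
         String.ofList (PySem.Chars.join [' '] (PySem.List.slice sents none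
           (some ((pvBisectB (sents.foldl pvCumB (0, [])).2 mx 0 ((sents.foldl pvCumB (0, [])).2).length : ℕ) : Int))))
       else String.ofList (PySem.List.slice cs none (some mx))) := by
  have hcum : (sents.foldl pvCumB (0, [])).2 = pvCumL sents 0 := by
    simpa using pvCum_eq sents 0 []
  have hlen : (pvCumL sents 0).length = sents.length := pvCumL_length _ _
  have hmono : ∀ i j, i ≤ j → j < (pvCumL sents 0).length →
      (pvCumL sents 0).getD i 0 ≤ (pvCumL sents 0).getD j 0 := by
    intro i j hij hj
    rcases Nat.lt_or_ge i j with h | h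
    · rw [List.getD_eq_getElem _ _ (by omega), List.getD_eq_getElem _ _ hj]
      exact List.pairwise_iff_getElem.mp (pvCumL_pairwise sents 0) i j (by omega) hj h
    · have : i = j := by omega
      subst this; exact le_refl _
  have hbis : pvBisectB (pvCumL sents 0) mx 0 (pvCumL sents 0).length
      = ((pvCumL sents 0).takeWhile (fun x => decide (x ≤ mx))).length :=
    pvBisect_spec _ _ 0 _ (Nat.zero_le _) le_rfl hmono
      (fun i hi => absurd hi (Nat.not_lt_zero i)) (fun i hi hilen h => absurd hilen (by omega))
  set k := ((pvCumL sents 0).takeWhile (fun x => decide (x ≤ mx))).length with hkdef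
  have hkle : k ≤ sents.length := by
    rw [← hlen]; exact (List.takeWhile_sublist _).length_le
  have hres : pvGreedyA mx sents [] = ((sents.take k).map (· ++ [' '])).flatten := by
    rw [pvGreedyA_eq]
    simp only [List.nil_append, List.length_nil, Nat.cast_zero]
    rw [pvGTake_eq_take]
  rw [hcum, hbis, hres]
  by_cases hk0 : k = 0
  · simp [hk0]
  · have htne : sents.take k ≠ [] := by
      rw [Ne, List.take_eq_nil_iff]
      push Not
      refine ⟨hk0, ?_⟩
      intro h; subst h; simp at hkle; omega
    have hfne : ((sents.take k).map (· ++ [' '])).flatten ≠ [] := by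
      rcases hT : sents.take k with _ | ⟨a, b⟩
      · exact absurd hT htne
      · simp
    rw [if_pos hfne, if_pos hk0]
    congr 1
    rw [PySem.List.slice_to_natCast]
    exact pvStrip_flatten _ htne (fun x hx => hs x ((List.take_sublist _ _).subset hx))

-- ===== VERDICT (by name: the statement is the Claim_ definition above) =====
theorem extract_top_sentences_spec : Claim_equal_extract_top_sentences := by
  intro text mx _
  unfold Spec_extract_top_sentences extract_top_sentences extract_top_sentences_alt
  by_cases htop : PySem.Str.len text ≤ mx
  · rw [if_pos htop, if_pos htop]
  · rw [if_neg htop, if_neg htop]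
    have hstep : pvStepB = pvStepA := rfl
    rw [hstep]
    apply pvMain
    by_cases hcond : PySem.Chars.strip ((text.toList.foldl pvStepA ([], [])).2) ≠ []
    · rw [if_pos hcond]
      intro s hsmem
      rcases List.mem_append.mp hsmem with h | h
      · exact pvSplit_inv text.toList ([], []) (by simp) s h
      · have hs' : s = PySem.Chars.strip ((text.toList.foldl pvStepA ([], [])).2) := by
          simpa using h
        subst hs'
        exact ⟨hcond, pvStrip_idem _⟩
    · rw [if_neg hcond]
      exact pvSplit_inv text.toList ([], []) (by simp)
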